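-- pv_equiv track=rewrite | github.com/gabru-md/integrity | apps/rtv.py | _srt_to_vtt
-- ===== SOURCE A (Python) =====
-- def _srt_to_vtt(content: str) -> str:
--     normalized = content.replace("\r\n", "\n").replace("\r", "\n")
--     lines = ["WEBVTT", ""]
--     for line in normalized.split("\n"):
--         if "-->" in line:
--             line = line.replace(",", ".")
--         lines.append(line)
--     return "\n".join(lines).strip() + "\n"
-- ===== SOURCE B (Python) =====
-- def _srt_to_vtt(content: str) -> str:
--     # Single streaming pass over the normalized text: a 3-state matcher spots
--     # "-->" while the line is being read, instead of split + membership + replace.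
--     normalized = content.replace("\r\n", "\n").replace("\r", "\n")
--     out = list("WEBVTT\n\n")
--     buf = []
--     dashes = 0
--     arrow = False
--     for c in normalized:
--         if c == "\n":
--             if arrow:
--                 out.extend("." if ch == "," else ch for ch in buf)
--             else:
--                 out.extend(buf)
--             out.append("\n")
--             buf = []
--             dashes = 0
--             arrow = False
--         else:
--             buf.append(c)
--             if c == "-":
--                 dashes = min(dashes + 1, 2)
--             else:
--                 if c == ">" and dashes == 2:
--                     arrow = True
--                 dashes = 0
--     if arrow:
--         out.extend("." if ch == "," else ch for ch in buf)
--     else: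
--         out.extend(buf)
--     return "".join(out).strip() + "\n"
-- ===== Notes on version B (the rewrite author's own statement) =====
-- stated objective: alternative
-- what changed: Replaces A's split-into-lines / '-->' membership test / comma replace pipeline with a single streaming pass over the normalized text that buffers the current line while a 3-state matcher detects '-->' on the fly, emitting each line (with commas mapped to dots when the matcher fired) directly into the output.
import Mathlib
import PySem

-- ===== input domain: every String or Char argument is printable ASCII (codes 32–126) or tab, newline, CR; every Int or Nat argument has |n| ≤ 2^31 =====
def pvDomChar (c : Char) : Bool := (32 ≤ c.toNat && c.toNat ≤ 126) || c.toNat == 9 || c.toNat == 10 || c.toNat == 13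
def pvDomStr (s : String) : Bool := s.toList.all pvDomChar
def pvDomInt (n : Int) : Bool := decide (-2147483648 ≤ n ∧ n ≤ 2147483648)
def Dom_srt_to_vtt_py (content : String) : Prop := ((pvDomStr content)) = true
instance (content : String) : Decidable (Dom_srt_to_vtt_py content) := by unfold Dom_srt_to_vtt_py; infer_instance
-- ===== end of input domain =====

-- B replaces A's split / membership-test / replace pipeline with one streaming pass whose
-- 3-state matcher spots "-->" while the line is read; same return value, alternative structure.

-- ===== PORT A =====
def srt_to_vtt_py (content : String) : String :=
  let normalized := PySem.Chars.replace (PySem.Chars.replace content.toList ['\r', '\n'] ['\n']) ['\r'] ['\n']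
  let lines := (PySem.Chars.splitOn normalized ['\n']).foldl
    (fun acc line =>
      acc ++ [if PySem.Chars.isIn ['-', '-', '>'] line then PySem.Chars.replace line [','] ['.'] else line])
    [['W', 'E', 'B', 'V', 'T', 'T'], []]
  String.ofList (PySem.Chars.strip (PySem.Chars.join ['\n'] lines) ++ ['\n'])

-- ===== PORT B =====
def vttEmit (buf : List Char) (arrow : Bool) : List Char :=
  if arrow then buf.map (fun ch => if ch = ',' then '.' else ch) else buf

def vttScan : List Char → List Char → Nat → Bool → List Char
  | [], buf, _, arrow => vttEmit buf arrow
  | c :: cs, buf, dashes, arrow =>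
    if c = '\n' then vttEmit buf arrow ++ '\n' :: vttScan cs [] 0 false
    else if c = '-' then vttScan cs (buf ++ [c]) (min (dashes + 1) 2) arrow
    else vttScan cs (buf ++ [c]) 0 (arrow || (decide (c = '>') && dashes == 2))

def srt_to_vtt_py_alt (content : String) : String :=
  let normalized := PySem.Chars.replace (PySem.Chars.replace content.toList ['\r', '\n'] ['\n']) ['\r'] ['\n']
  String.ofList (PySem.Chars.strip
    (['W', 'E', 'B', 'V', 'T', 'T', '\n', '\n'] ++ vttScan normalized [] 0 false) ++ ['\n'])

-- ===== PRECONDITION & SPEC =====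
def Spec_srt_to_vtt_py (content : String) (out : String) : Prop := out = srt_to_vtt_py_alt content
instance (content : String) (out : String) : Decidable (Spec_srt_to_vtt_py content out) := by unfold Spec_srt_to_vtt_py; infer_instance

-- ===== CLAIM (what is proved, stated in full; the proofs are below) =====
def Claim_equal_srt_to_vtt_py : Prop := ∀ (content : String), Dom_srt_to_vtt_py content → Spec_srt_to_vtt_py content (srt_to_vtt_py content)

-- ===== LEMMAS AND PROOFS =====

-- proof-only helpers: a structural description of splitting on '\n', and the matcher run alone
def vttSplit : List Char → List Char → List (List Char)
  | pre, [] => [pre]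
  | pre, c :: r => if c = '\n' then pre :: vttSplit [] r else vttSplit (pre ++ [c]) r

def lineSplit : List Char → List Char × Option (List Char)
  | [] => ([], none)
  | c :: r => if c = '\n' then ([], some r) else ((c :: (lineSplit r).1, (lineSplit r).2))

def vttDfa : List Char → Nat → Bool → Bool
  | [], _, arrow => arrow
  | c :: cs, dashes, arrow =>
    if c = '-' then vttDfa cs (min (dashes + 1) 2) arrow
    else vttDfa cs 0 (arrow || (decide (c = '>') && dashes == 2))

theorem splitOn_go_eq : ∀ (fuel : Nat) (l cur : List Char) (acc : List (List Char)), l.length < fuel →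
    PySem.Chars.splitOn.go ['\n'] fuel l cur acc = acc.reverse ++ vttSplit cur.reverse l := by
  intro fuel
  induction fuel with
  | zero => intro l cur acc h; omega
  | succ fuel ih =>
    intro l cur acc h
    cases l with
    | nil => simp [PySem.Chars.splitOn.go, vttSplit]
    | cons c rest =>
      rw [PySem.Chars.splitOn.go]
      by_cases hc : c = '\n'
      · subst hc
        simp only [List.isPrefixOf, BEq.rfl, Bool.and_self, if_pos, List.length_cons,
          List.length_nil, List.drop_succ_cons, List.drop_zero, Nat.zero_add]
        rw [ih rest [] _ (by simp at h; omega)]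
        simp [vttSplit]
      · have hp : (['\n'].isPrefixOf (c :: rest)) = false := by
          simp [List.isPrefixOf]; intro h'; exact absurd h'.symm hc
        rw [if_neg (by simp [hp])]
        rw [ih rest (c :: cur) acc (by simp at h; omega)]
        simp [vttSplit, hc]

theorem splitOn_eq (n : List Char) : PySem.Chars.splitOn n ['\n'] = vttSplit [] n := by
  rw [PySem.Chars.splitOn, splitOn_go_eq (n.length + 1) n [] [] (by omega)]
  simp

theorem replace_go_eq : ∀ (fuel : Nat) (l acc : List Char), l.length ≤ fuel →
    PySem.Chars.replace.go [','] ['.'] fuel l acc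
      = acc.reverse ++ l.map (fun ch => if ch = ',' then '.' else ch) := by
  intro fuel
  induction fuel with
  | zero => intro l acc h
            rw [PySem.Chars.replace.go]
            simp at h; simp [h]
  | succ fuel ih =>
    intro l acc h
    cases l with
    | nil => rw [PySem.Chars.replace.go]; simp; omega
    | cons c rest =>
      rw [PySem.Chars.replace.go]
      by_cases hc : c = ','
      · subst hc
        simp only [List.isPrefixOf, BEq.rfl, Bool.and_self, if_pos, List.length_cons,
          List.drop_succ_cons, List.drop_zero, List.length_nil, Nat.zero_add,
          List.reverse_singleton, List.singleton_append]
        rw [ih rest _ (by simp at h; omega)]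
        simp
      · have hp : ([','].isPrefixOf (c :: rest)) = false := by
          simp [List.isPrefixOf]; intro h'; exact absurd h'.symm hc
        rw [if_neg (by simp [hp])]
        rw [ih rest _ (by simp at h; omega)]
        simp [hc]

theorem replace_comma (l : List Char) :
    PySem.Chars.replace l [','] ['.'] = l.map (fun ch => if ch = ',' then '.' else ch) := by
  rw [PySem.Chars.replace]
  simp [replace_go_eq l.length l [] (le_refl _)]

theorem isIn_cons (pat : List Char) (c : Char) (cs : List Char) :
    PySem.Chars.isIn pat (c :: cs) = (decide (pat <+: c :: cs) || PySem.Chars.isIn pat cs) := by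
  rw [Bool.eq_iff_iff]
  simp [PySem.Chars.isIn_iff_infix, List.infix_cons_iff]

theorem dfa_correct : ∀ (l : List Char) (d : Nat) (a : Bool), d ≤ 2 →
    vttDfa l d a = (a || PySem.Chars.isIn ['-', '-', '>'] (List.replicate d '-' ++ l)) := by
  intro l
  induction l with
  | nil =>
    intro d a h
    interval_cases d
    · have h0 : PySem.Chars.isIn ['-', '-', '>'] ([] : List Char) = false := by decide
      simp [vttDfa, h0]
    · have h1 : PySem.Chars.isIn ['-', '-', '>'] ['-'] = false := by decide
      simp [vttDfa, h1]
    · have h2 : PySem.Chars.isIn ['-', '-', '>'] ['-', '-'] = false := by decide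
      simp [vttDfa, h2]
  | cons c cs ih =>
    intro d a h
    by_cases hd : c = '-'
    · subst hd
      have hstep : vttDfa ('-' :: cs) d a = vttDfa cs (min (d + 1) 2) a := by simp [vttDfa]
      rw [hstep, ih _ a (by omega),
        show (List.replicate d '-' ++ '-' :: cs) = List.replicate (d + 1) '-' ++ cs by
          simp [List.replicate_succ']]
      rcases Nat.lt_or_ge d 2 with hlt | hge
      · rw [show min (d + 1) 2 = d + 1 by omega]
      · have hd2 : d = 2 := by omega
        subst hd2
        congr 1
        rw [Bool.eq_iff_iff]
        simp [isIn_cons, List.cons_prefix_cons]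
        try tauto
    · have hstep : vttDfa (c :: cs) d a = vttDfa cs 0 (a || (decide (c = '>') && d == 2)) := by
        simp [vttDfa, hd]
      rw [hstep, ih _ _ (by omega)]
      interval_cases d
      · rw [Bool.eq_iff_iff]; simp [isIn_cons, List.cons_prefix_cons]; try tauto
      · rw [Bool.eq_iff_iff]; simp [isIn_cons, List.cons_prefix_cons]; try tauto
      · rw [Bool.eq_iff_iff]; simp [isIn_cons, List.cons_prefix_cons]; try tauto

theorem scan_split : ∀ (n buf : List Char) (d : Nat) (a : Bool),
    vttScan n buf d a = vttEmit (buf ++ (lineSplit n).1) (vttDfa (lineSplit n).1 d a) ++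
      (match (lineSplit n).2 with | none => [] | some r => '\n' :: vttScan r [] 0 false) := by
  intro n
  induction n with
  | nil => intro buf d a; simp [vttScan, lineSplit, vttDfa]
  | cons c r ih =>
    intro buf d a
    by_cases hc : c = '\n'
    · subst hc; simp [vttScan, lineSplit, vttDfa]
    · by_cases hd : c = '-'
      · subst hd
        simp only [vttScan, lineSplit, vttDfa, if_neg hc, ih]
        simp
      · simp only [vttScan, lineSplit, vttDfa, if_neg hc, if_neg hd, ih]
        simp

theorem vttSplit_lineSplit : ∀ (n pre : List Char),
    vttSplit pre n = (pre ++ (lineSplit n).1) ::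
      (match (lineSplit n).2 with | none => [] | some r => vttSplit [] r) := by
  intro n
  induction n with
  | nil => intro pre; simp [vttSplit, lineSplit]
  | cons c r ih =>
    intro pre
    by_cases hc : c = '\n'
    · subst hc; simp [vttSplit, lineSplit]
    · simp only [vttSplit, lineSplit, if_neg hc, ih]
      simp

theorem lineSplit_length : ∀ (n r : List Char), (lineSplit n).2 = some r → r.length < n.length := by
  intro n
  induction n with
  | nil => intro r h; simp [lineSplit] at h
  | cons c t ih =>
    intro r h
    by_cases hc : c = '\n'
    · subst hc; simp [lineSplit] at h; subst h; simp
    · simp only [lineSplit, if_neg hc] at h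
      have := ih r h; simp; omega

theorem emit_line (L : List Char) :
    vttEmit L (vttDfa L 0 false)
      = if PySem.Chars.isIn ['-', '-', '>'] L then L.map (fun ch => if ch = ',' then '.' else ch) else L := by
  rw [dfa_correct L 0 false (by omega)]
  simp [vttEmit]

theorem main_aux : ∀ (k : Nat) (n : List Char), n.length ≤ k →
    PySem.Chars.join ['\n'] ((vttSplit [] n).map
      (fun line => if PySem.Chars.isIn ['-', '-', '>'] line then line.map (fun ch => if ch = ',' then '.' else ch) else line))
      = vttScan n [] 0 false := by
  intro k
  induction k with
  | zero =>
    intro n h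
    have : n = [] := by cases n <;> simp_all
    subst this
    simp [vttSplit, vttScan, vttEmit, PySem.Chars.join_singleton]
  | succ k ih =>
    intro n h
    rw [vttSplit_lineSplit n [], scan_split n [] 0 false]
    cases h2 : (lineSplit n).2 with
    | none =>
      simp only [h2]
      rw [List.map_cons]
      simp only [List.map_nil]
      rw [PySem.Chars.join_singleton]
      simp [emit_line]
    | some r =>
      simp only [h2]
      have hr := ih r (by have := lineSplit_length n r h2; omega)
      rcases e : vttSplit [] r with _ | ⟨y, ys⟩
      · have := vttSplit_lineSplit r []
        rw [e] at this; exact absurd this (by simp)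
      · rw [e, List.map_cons] at hr
        rw [List.map_cons, List.map_cons, PySem.Chars.join_cons_cons, hr]
        simp [emit_line]

theorem main_eq (n : List Char) :
    PySem.Chars.join ['\n'] ((vttSplit [] n).map
      (fun line => if PySem.Chars.isIn ['-', '-', '>'] line then line.map (fun ch => if ch = ',' then '.' else ch) else line))
      = vttScan n [] 0 false :=
  main_aux n.length n (le_refl _)

theorem joined_eq (n : List Char) :
    PySem.Chars.join ['\n'] ((PySem.Chars.splitOn n ['\n']).foldl
      (fun acc line =>
        acc ++ [if PySem.Chars.isIn ['-', '-', '>'] line then PySem.Chars.replace line [','] ['.'] else line])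
      [['W', 'E', 'B', 'V', 'T', 'T'], []])
      = ['W', 'E', 'B', 'V', 'T', 'T', '\n', '\n'] ++ vttScan n [] 0 false := by
  rw [PySem.List.foldl_append_singleton_eq_map]
  simp only [replace_comma, splitOn_eq]
  rcases e : vttSplit [] n with _ | ⟨y, ys⟩
  · have := vttSplit_lineSplit n []
    rw [e] at this; exact absurd this (by simp)
  · have hm := main_eq n
    rw [e, List.map_cons] at hm
    rw [List.map_cons]
    simp only [List.cons_append, List.nil_append]
    rw [PySem.Chars.join_cons_cons, PySem.Chars.join_cons_cons, hm]
    simp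

-- ===== VERDICT (by name: the statement is the Claim_ definition above) =====
theorem srt_to_vtt_py_spec : Claim_equal_srt_to_vtt_py := by
  intro content _
  show srt_to_vtt_py content = srt_to_vtt_py_alt content
  unfold srt_to_vtt_py srt_to_vtt_py_alt
  exact congrArg (fun l => String.ofList (PySem.Chars.strip l ++ ['\n'])) (joined_eq _)
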